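-- pv_equiv track=rewrite | github.com/RobertSDM/be-tiny-drive | app/core/extract_file_metadata.py | generate_folders_paths
-- ===== SOURCE A (Python) =====
-- def generate_folders_paths(folders: list[str]) -> list[str]:
--     paths = list()
--
--     for f in folders:
--         if len(paths) > 0:
--             paths.append(f"{paths[-1]}/{f}")
--         else:
--             paths.append(f)
--
--     return list(paths)
-- ===== SOURCE B (Python) =====
-- def generate_folders_paths(folders: list[str]) -> list[str]:
--     return ["/".join(folders[:i + 1]) for i in range(len(folders))]
-- ===== Notes on version B (the rewrite author's own statement) =====
-- stated objective: simpler
-- what changed: Replaces the accumulator loop that extends paths[-1] (with a first-element special case) by a one-line comprehension that computes each cumulative path independently as '/'.join of the length-(i+1) prefix.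
import Mathlib
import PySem

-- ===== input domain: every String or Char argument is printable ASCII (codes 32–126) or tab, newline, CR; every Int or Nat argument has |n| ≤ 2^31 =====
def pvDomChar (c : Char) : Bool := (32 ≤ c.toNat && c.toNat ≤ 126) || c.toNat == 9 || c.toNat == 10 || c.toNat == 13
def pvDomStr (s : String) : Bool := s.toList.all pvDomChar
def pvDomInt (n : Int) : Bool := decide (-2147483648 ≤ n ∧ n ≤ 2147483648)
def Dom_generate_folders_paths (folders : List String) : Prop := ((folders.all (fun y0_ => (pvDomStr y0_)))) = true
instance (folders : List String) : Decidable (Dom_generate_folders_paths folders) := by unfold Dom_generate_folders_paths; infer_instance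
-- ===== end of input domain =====

-- B replaces A's running-accumulator loop (extend paths[-1], first-element special case) by a
-- comprehension that joins each prefix folders[:i+1] independently: simpler, same outputs.

-- ===== PORT A =====
-- the loop body: append paths[-1] + "/" + f if paths is nonempty, else append f
def generate_folders_paths (folders : List String) : List String :=
  (folders.foldl (fun paths f =>
    if paths.length > 0 then
      paths ++ [PySem.List.pyGetD paths (-1) "" ++ "/" ++ f]
    else
      paths ++ [f]) [])

-- ===== PORT B =====
-- ["/".join(folders[:i+1]) for i in range(len(folders))]
def generate_folders_paths_alt (folders : List String) : List String :=
  (PySem.List.pyRange 0 (folders.length : Int) 1).map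
    (fun i => PySem.Str.join "/" (PySem.List.slice folders none (some (i + 1))))

-- ===== PRECONDITION & SPEC =====
def Spec_generate_folders_paths (folders : List String) (out : List String) : Prop := out = generate_folders_paths_alt folders
instance (folders : List String) (out : List String) : Decidable (Spec_generate_folders_paths folders out) := by unfold Spec_generate_folders_paths; infer_instance

-- ===== CLAIM (what is proved, stated in full; the proofs are below) =====
def Claim_equal_generate_folders_paths : Prop := ∀ (folders : List String), Dom_generate_folders_paths folders → Spec_generate_folders_paths folders (generate_folders_paths folders)

-- ===== LEMMAS AND PROOFS =====

-- '/'-join of a list extended on the right, when the list was nonempty (Chars level)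
theorem pv_chars_join_concat (sep : List Char) (xs : List (List Char)) (x : List Char)
    (h : xs ≠ []) :
    PySem.Chars.join sep (xs ++ [x]) = PySem.Chars.join sep xs ++ sep ++ x := by
  induction xs with
  | nil => exact absurd rfl h
  | cons a rest ih =>
    cases rest with
    | nil =>
      simp [PySem.Chars.join_cons_cons, PySem.Chars.join_singleton]
    | cons b rest' =>
      have := ih (by simp)
      simp only [List.cons_append, PySem.Chars.join_cons_cons] at this ⊢
      rw [this]
      simp [List.append_assoc]

-- the same at String level
theorem pv_join_concat (sep : String) (xs : List String) (x : String) (h : xs ≠ []) :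
    PySem.Str.join sep (xs ++ [x]) = PySem.Str.join sep xs ++ sep ++ x := by
  have hchars := pv_chars_join_concat sep.toList (xs.map String.toList) x.toList
    (by simpa using h)
  apply String.toList_injective
  simp only [PySem.Str.toList_join, String.toList_append, List.map_append, List.map_cons,
    List.map_nil]
  simpa using hchars

theorem pv_pyGetD_concat_neg_one (ys : List String) (a d : String) :
    PySem.List.pyGetD (ys ++ [a]) (-1) d = a := by
  simp [PySem.List.pyGetD, PySem.List.pyGet?, PySem.List.pyIdx?]

-- A's loop computes exactly the prefix-joins, proved by induction from the right
theorem pv_loopA (xs : List String) :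
    xs.foldl (fun paths f =>
      if paths.length > 0 then
        paths ++ [PySem.List.pyGetD paths (-1) "" ++ "/" ++ f]
      else
        paths ++ [f]) []
    = (List.range xs.length).map (fun k => PySem.Str.join "/" (xs.take (k + 1))) := by
  induction xs using List.reverseRecOn with
  | nil => simp
  | append_singleton xs x ih =>
    rw [List.foldl_append, ih]
    simp only [List.foldl_cons, List.foldl_nil]
    cases xs with
    | nil =>
      simp [PySem.Str.join]
    | cons y ys =>
      set xs' := y :: ys with hxs
      have hlen : xs'.length = ys.length + 1 := by simp [hxs]
      -- the accumulator so far, with its last element split off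
      have hsplit : (List.range xs'.length).map
          (fun k => PySem.Str.join "/" (xs'.take (k + 1)))
          = (List.range ys.length).map (fun k => PySem.Str.join "/" (xs'.take (k + 1)))
            ++ [PySem.Str.join "/" xs'] := by
        have htk : List.take (ys.length + 1) xs' = xs' :=
          List.take_of_length_le (by omega)
        rw [hlen, List.range_succ, List.map_append]
        simp [htk]
      rw [hsplit]
      have hpos : ((List.range ys.length).map (fun k => PySem.Str.join "/" (xs'.take (k + 1)))
          ++ [PySem.Str.join "/" xs']).length > 0 := by simp
      rw [if_pos hpos, pv_pyGetD_concat_neg_one]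
      -- now rewrite the right-hand side for xs' ++ [x]
      have hlen2 : (xs' ++ [x]).length = xs'.length + 1 := by simp
      rw [hlen2, List.range_succ, List.map_append]
      have htake_last : (xs' ++ [x]).take (xs'.length + 1) = xs' ++ [x] := by
        rw [List.take_of_length_le]; simp
      have hjoin : PySem.Str.join "/" (xs' ++ [x]) = PySem.Str.join "/" xs' ++ "/" ++ x :=
        pv_join_concat "/" xs' x (by simp [hxs])
      have hprefix : (List.range xs'.length).map
          (fun k => PySem.Str.join "/" ((xs' ++ [x]).take (k + 1)))
          = (List.range ys.length).map (fun k => PySem.Str.join "/" (xs'.take (k + 1)))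
            ++ [PySem.Str.join "/" xs'] := by
        rw [hlen, List.range_succ, List.map_append]
        congr 1
        · apply List.map_congr_left
          intro k hk
          rw [List.mem_range] at hk
          rw [List.take_append_of_le_length (by omega)]
        · have h1 : (xs' ++ [x]).take (ys.length + 1) = xs'.take (ys.length + 1) :=
            List.take_append_of_le_length (by omega)
          have h2 : xs'.take (ys.length + 1) = xs' :=
            List.take_of_length_le (by omega)
          simp [h1, h2]
      rw [hprefix]
      simp [htake_last, hjoin]

-- B's port, normalised to prefix-joins over List.range
theorem pv_altB (folders : List String) :
    generate_folders_paths_alt folders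
    = (List.range folders.length).map (fun k => PySem.Str.join "/" (folders.take (k + 1))) := by
  unfold generate_folders_paths_alt
  rw [PySem.List.pyRange_one, List.map_map]
  apply List.map_congr_left
  intro k hk
  have : (0 : Int) + (k : Int) + 1 = ((k + 1 : Nat) : Int) := by push_cast; ring
  simp only [Function.comp_apply, this, PySem.List.slice_to_natCast]

-- ===== VERDICT (by name: the statement is the Claim_ definition above) =====
theorem generate_folders_paths_spec : Claim_equal_generate_folders_paths := by
  intro folders _
  unfold Spec_generate_folders_paths generate_folders_paths
  rw [pv_altB, pv_loopA]
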